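-- pv_equiv track=rewrite | github.com/nachiketmparanjape/Practice_Problems | az_3.py | nearby_az
-- ===== SOURCE A (Python) =====
-- def nearby_az(string):
--     i1 = 0
--     i2 = 0
--     n = 0
--     for i in string:
--         if i == 'a':
--             i1 = n
--         n += 1
--     n = 0
--     for i in string:
--         if i == 'z':
--             i2 = n
--         n += 1
--     if i2-i1 > 0 & i2-i1 < 4:
--         return True
--     else:
--         return False
-- ===== SOURCE B (Python) =====
-- def nearby_az(string):
--     last_a = max(0, string.rfind('a'))
--     return 'z' in string[last_a + 1:]
-- ===== Notes on version B (the rewrite author's own statement) =====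
-- stated objective: simpler
-- what changed: Replaces A's two explicit index-tracking loops and the bitwise-precedence condition (which reduces to: the last z-position exceeds the last a-position, with 0 as default) by one rfind for the last a-position followed by a slice membership test for z after it.
import Mathlib
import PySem

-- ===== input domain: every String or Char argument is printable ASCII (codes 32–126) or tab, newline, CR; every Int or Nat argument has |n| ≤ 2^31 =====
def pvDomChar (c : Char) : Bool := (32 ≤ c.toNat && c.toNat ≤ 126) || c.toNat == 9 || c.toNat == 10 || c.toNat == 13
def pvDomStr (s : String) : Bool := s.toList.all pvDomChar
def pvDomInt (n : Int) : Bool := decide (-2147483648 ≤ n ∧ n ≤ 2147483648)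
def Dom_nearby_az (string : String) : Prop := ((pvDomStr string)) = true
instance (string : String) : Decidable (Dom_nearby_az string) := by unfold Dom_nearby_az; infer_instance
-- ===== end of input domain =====

-- B replaces A's two index-tracking loops and its bitwise-precedence condition by one
-- rfind for the last a-position plus a slice membership test for z after it (objective: simpler).


-- ===== PORT A =====
-- literal transliteration: two passes over the string tracking the running index n,
-- then the chained comparison i2-i1 > 0 & i2-i1 < 4 with Python's & precedence kept
-- (it parses as i2-i1 > (0 & (i2-i1)) < 4).
def nearby_az (string : String) : Bool :=
  let p1 := string.toList.foldl
    (fun (p : Int × Int) i => (if i = 'a' then p.2 else p.1, p.2 + 1)) (0, 0)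
  let i1 := p1.1
  let p2 := string.toList.foldl
    (fun (p : Int × Int) i => (if i = 'z' then p.2 else p.1, p.2 + 1)) (0, 0)
  let i2 := p2.1
  if i2 - i1 > PySem.Int.band 0 (i2 - i1) ∧ PySem.Int.band 0 (i2 - i1) < 4 then true
  else false

-- ===== PORT B =====
def nearby_az_alt (string : String) : Bool :=
  let last_a := max 0 (PySem.Str.rfind string "a")
  PySem.Str.isIn "z" (PySem.Str.slice string (some (last_a + 1)) none)

-- ===== PRECONDITION & SPEC =====
def Spec_nearby_az (string : String) (out : Bool) : Prop := out = nearby_az_alt string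
instance (string : String) (out : Bool) : Decidable (Spec_nearby_az string out) := by unfold Spec_nearby_az; infer_instance

-- ===== CLAIM (what is proved, stated in full; the proofs are below) =====
def Claim_equal_nearby_az : Prop := ∀ (string : String), Dom_nearby_az string → Spec_nearby_az string (nearby_az string)

-- ===== LEMMAS AND PROOFS =====

def lastP (c : Char) : List Char → Option Nat
  | [] => none
  | x :: xs =>
    match lastP c xs with
    | some k => some (k + 1)
    | none => if x = c then some 0 else none

theorem foldl_lastP (c : Char) (s : List Char) : ∀ (a0 n0 : Int),
    s.foldl (fun (p : Int × Int) i => (if i = c then p.2 else p.1, p.2 + 1)) (a0, n0)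
      = ((lastP c s).elim a0 (fun k => n0 + (k : Int)), n0 + (s.length : Int)) := by
  induction s with
  | nil => intro a0 n0; simp [lastP]
  | cons x xs ih =>
    intro a0 n0
    simp only [List.foldl_cons, ih]
    rcases h : lastP c xs with _ | k
    · simp only [lastP, h, Prod.mk.injEq]
      split_ifs <;> simp [List.length_cons] <;> omega
    · simp only [lastP, h, Prod.mk.injEq, Option.elim_some]
      constructor <;> simp [List.length_cons] <;> omega

theorem mem_drop_iff_lastP (c : Char) (s : List Char) : ∀ (m : Nat),
    c ∈ s.drop m ↔ ∃ k, lastP c s = some k ∧ m ≤ k := by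
  induction s with
  | nil => intro m; simp [lastP]
  | cons x xs ih =>
    intro m
    cases m with
    | zero =>
      rcases h : lastP c xs with _ | k
      · have hx : c ∉ xs := by
          intro hc
          rcases (ih 0).mp (by simpa using hc) with ⟨k, hk, -⟩
          rw [h] at hk; simp at hk
        simp only [List.drop_zero, List.mem_cons, lastP, h]
        constructor
        · rintro (rfl | hc)
          · simp
          · exact absurd hc hx
        · rintro ⟨k, hk, -⟩
          by_cases hxc : x = c
          · exact Or.inl hxc.symm
          · rw [if_neg hxc] at hk; simp at hk
      · have hmem : c ∈ xs := by
          have := (ih 0).mpr ⟨k, h, Nat.zero_le _⟩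
          simpa using this
        simp only [List.drop_zero, List.mem_cons, lastP, h]
        constructor
        · intro _; exact ⟨k + 1, rfl, Nat.zero_le _⟩
        · intro _; exact Or.inr hmem
    | succ m =>
      have hd : (x :: xs).drop (m + 1) = xs.drop m := rfl
      rw [hd, ih m]
      rcases h : lastP c xs with _ | k
      · simp only [lastP, h]
        constructor
        · rintro ⟨k, hk, -⟩; simp at hk
        · rintro ⟨k, hk, hm⟩
          by_cases hxc : x = c
          · rw [if_pos hxc] at hk; simp at hk; omega
          · rw [if_neg hxc] at hk; simp at hk
      · simp only [lastP, h]
        constructor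
        · rintro ⟨k1, hk1, hm⟩
          simp at hk1
          exact ⟨k + 1, rfl, by omega⟩
        · rintro ⟨k2, hk2, hm⟩
          simp at hk2
          exact ⟨k, rfl, by omega⟩

theorem lastP_append (c : Char) (t u : List Char) :
    lastP c (t ++ u) = (lastP c u).elim (lastP c t) (fun k => some (t.length + k)) := by
  induction t with
  | nil => rcases h : lastP c u with _ | k <;> simp [lastP, h]
  | cons x t' ih =>
    rcases h : lastP c u with _ | k
    · simp only [h, Option.elim_none] at ih ⊢
      simp only [List.cons_append, lastP, ih]
    · simp only [h, Option.elim_some] at ih ⊢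
      simp only [List.cons_append, lastP, ih]
      simp; omega

theorem singleton_isPrefixOf (c : Char) (t : List Char) :
    [c].isPrefixOf t = true ↔ t.head? = some c := by
  cases t with
  | nil => simp [List.isPrefixOf]
  | cons y t' =>
    rw [List.isPrefixOf_iff_prefix, List.cons_prefix_cons]
    simp [eq_comm]

theorem rfind_go_lastP (c : Char) (s : List Char) : ∀ (j : Nat),
    PySem.Chars.rfind.go s [c] j
      = (lastP c (s.take (j + 1))).elim (-1) (fun k => (k : Int)) := by
  intro j
  induction j with
  | zero =>
    cases s with
    | nil => simp [PySem.Chars.rfind.go, lastP]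
    | cons x xs =>
      simp only [PySem.Chars.rfind.go]
      rw [show List.take 1 (x :: xs) = [x] by simp]
      by_cases hx : x = c
      · rw [(singleton_isPrefixOf c (x :: xs)).mpr (by simp [hx])]
        simp [lastP, hx]
      · have h2 : [c].isPrefixOf (x :: xs) = false := by
          rw [← Bool.not_eq_true, singleton_isPrefixOf]
          simp; intro h; exact hx h
        rw [h2]
        simp [lastP, hx]
  | succ j ih =>
    simp only [PySem.Chars.rfind.go]
    rcases h : s.drop (j + 1) with _ | ⟨y, t⟩
    · have hlen : s.length ≤ j + 1 := List.drop_eq_nil_iff.mp h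
      have h1 : s.take (j + 1 + 1) = s := List.take_of_length_le (by omega)
      have h2 : s.take (j + 1) = s := List.take_of_length_le hlen
      rw [show ([c].isPrefixOf ([] : List Char)) = false from rfl]
      simp only [Bool.false_eq_true, if_false, ih, h1, h2]
    · have hlt : j + 1 < s.length := by
        by_contra hc
        rw [List.drop_eq_nil_iff.mpr (by omega)] at h; simp at h
      have hy' : s[j+1]? = some y := by
        rw [← List.head?_drop, h]; rfl
      have htake : s.take (j + 1 + 1) = s.take (j + 1) ++ [y] := by
        rw [List.take_add_one]
        congr 1
        simp [hy']
      have hlen' : (s.take (j + 1)).length = j + 1 := by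
        simp; omega
      rw [htake, lastP_append]
      by_cases hy : y = c
      · rw [(singleton_isPrefixOf c (y :: t)).mpr (by simp [hy])]
        simp [lastP, hy, hlen']
      · have h2 : [c].isPrefixOf (y :: t) = false := by
          rw [← Bool.not_eq_true, singleton_isPrefixOf]
          simp; intro hcy; exact hy hcy
        rw [h2]
        rw [ih, show lastP c [y] = none by simp [lastP, hy]]; simp

theorem rfind_lastP (c : Char) (s : List Char) :
    PySem.Chars.rfind s [c] = (lastP c s).elim (-1) (fun k => (k : Int)) := by
  show PySem.Chars.rfind.go s [c] s.length = _
  rw [rfind_go_lastP, List.take_of_length_le (by omega)]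

theorem isIn_singleton (c : Char) (t : List Char) :
    PySem.Chars.isIn [c] t = true ↔ c ∈ t := by
  rw [PySem.Chars.isIn_iff_infix]
  constructor
  · intro h
    exact h.subset (by simp)
  · intro h
    rcases List.append_of_mem h with ⟨t1, t2, rfl⟩
    exact ⟨t1, t2, by simp⟩

theorem nearby_az_eq_alt (string : String) : nearby_az string = nearby_az_alt string := by
  have hband : ∀ d : Int, PySem.Int.band 0 d = 0 := by
    intro d; rw [PySem.Int.band_comm]; simp
  have hif : ∀ (p : Prop) (inst : Decidable p), (if p then true else false) = decide p := by
    intro p inst; by_cases h : p <;> simp [h]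
  unfold nearby_az nearby_az_alt
  simp only [foldl_lastP, hband, hif, PySem.Str.rfind_eq, PySem.Str.isIn_eq, PySem.Str.toList_slice,
    PySem.Chars.slice_eq_listSlice]
  rw [show ("a".toList) = ['a'] from rfl, show ("z".toList) = ['z'] from rfl, rfind_lastP]
  rcases hA : lastP 'a' string.toList with _ | ka <;>
    rcases hZ : lastP 'z' string.toList with _ | kz
  · simp only [Option.elim_none]
    rw [show max 0 (-1 : Int) = 0 by omega,
      show ((0 : Int) + 1) = ((1 : Nat) : Int) by norm_num,
      PySem.List.slice_from_natCast]
    rw [Bool.eq_iff_iff]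
    simp only [decide_eq_true_iff, isIn_singleton, mem_drop_iff_lastP, hZ]
    simp
  · simp only [Option.elim_none, Option.elim_some]
    rw [show max 0 (-1 : Int) = 0 by omega,
      show ((0 : Int) + 1) = ((1 : Nat) : Int) by norm_num,
      PySem.List.slice_from_natCast]
    rw [Bool.eq_iff_iff]
    simp only [decide_eq_true_iff, isIn_singleton, mem_drop_iff_lastP, hZ]
    constructor
    · intro h
      exact ⟨kz, rfl, by omega⟩
    · rintro ⟨k, hk, hm⟩
      simp at hk
      omega
  · simp only [Option.elim_none, Option.elim_some]
    rw [show max 0 ((ka : Nat) : Int) = ((ka : Nat) : Int) by omega,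
      show (((ka : Nat) : Int) + 1) = ((ka + 1 : Nat) : Int) by push_cast; ring,
      PySem.List.slice_from_natCast]
    rw [Bool.eq_iff_iff]
    simp only [decide_eq_true_iff, isIn_singleton, mem_drop_iff_lastP, hZ]
    constructor
    · intro h; omega
    · rintro ⟨k, hk, hm⟩
      simp at hk
  · simp only [Option.elim_some]
    rw [show max 0 ((ka : Nat) : Int) = ((ka : Nat) : Int) by omega,
      show (((ka : Nat) : Int) + 1) = ((ka + 1 : Nat) : Int) by push_cast; ring,
      PySem.List.slice_from_natCast]
    rw [Bool.eq_iff_iff]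
    simp only [decide_eq_true_iff, isIn_singleton, mem_drop_iff_lastP, hZ]
    constructor
    · intro h
      exact ⟨kz, rfl, by omega⟩
    · rintro ⟨k, hk, hm⟩
      simp at hk
      omega

-- ===== VERDICT (by name: the statement is the Claim_ definition above) =====
theorem nearby_az_spec : Claim_equal_nearby_az := by
  intro string _
  exact nearby_az_eq_alt string
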